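-- pv_equiv track=rewrite | github.com/james5635/GeekForGeek-Data-Structure-and-Algorithm | sorting/easy/kth_smallest_removing/solution.py | kth_smallest_after_removal
-- ===== SOURCE A (Python) =====
-- from typing import List
--
-- def kth_smallest_after_removal(arr: List[int], k: int) -> int:
--     """
--     Find k-th smallest element after removing given integers from natural numbers.
--
--     Args:
--         arr: Array of integers to remove from natural numbers
--         k: Position of the element to find (1-based)
--
--     Returns:
--         k-th smallest element in remaining natural numbers, or -1 if not found
--     """
--     if k <= 0:
--         return -1
--
--     # Create a set of removed elements for O(1) lookup
--     removed = set(arr)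
--
--     # Count valid numbers until we find the k-th one
--     count = 0
--     num = 1
--
--     while count < k:
--         if num not in removed:
--             count += 1
--             if count == k:
--                 return num
--         num += 1
--
--         # Safety check to avoid infinite loop
--         if num > 10**9:
--             return -1
--
--     return -1
-- ===== SOURCE B (Python) =====
-- def kth_smallest_after_removal(arr, k):
--     """k-th smallest natural after removing arr; -1 if k <= 0 or answer exceeds 10**9."""
--     if k <= 0:
--         return -1
--     ans = k
--     for v in sorted(set(x for x in arr if x >= 1)):
--         if v <= ans:
--             ans += 1
--         else:
--             break
--     return ans if ans <= 10**9 else -1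
-- ===== Notes on version B (the rewrite author's own statement) =====
-- stated objective: faster
-- what changed: Instead of scanning the naturals 1,2,3,... and counting survivors until the k-th (O(answer) iterations), B sorts the distinct positive removed values once and walks them, bumping the candidate answer k past each removed value it covers, then applies the same 10^9 cap.
import Mathlib
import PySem

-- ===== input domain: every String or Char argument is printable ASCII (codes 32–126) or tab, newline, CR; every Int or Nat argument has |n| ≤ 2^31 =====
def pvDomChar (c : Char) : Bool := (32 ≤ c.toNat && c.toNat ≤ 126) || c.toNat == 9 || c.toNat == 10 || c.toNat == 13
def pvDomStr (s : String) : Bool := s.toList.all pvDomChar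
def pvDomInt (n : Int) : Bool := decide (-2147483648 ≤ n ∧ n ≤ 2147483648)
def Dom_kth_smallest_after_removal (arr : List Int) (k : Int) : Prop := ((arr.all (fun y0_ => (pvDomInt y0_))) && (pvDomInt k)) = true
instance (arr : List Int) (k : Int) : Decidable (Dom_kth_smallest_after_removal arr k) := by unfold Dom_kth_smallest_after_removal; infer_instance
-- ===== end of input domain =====

-- B replaces A's linear scan of the naturals (O(answer)) by sorting the distinct positive
-- removed values and walking them once to shift k to the answer (O(n log n), independent of k).


-- ===== PORT A =====
-- A's while-loop: scan num = 1, 2, …, counting numbers not in `removed`, return the k-th;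
-- the loop body checks `num > 10**9` after the increment and bails out with -1.
-- Fuel = 10^9 bounds the recursion; the loop recurses only while num + 1 ≤ 10^9, so the
-- fuel is never exhausted (the 0-case is unreachable).
def kthLoopA (removed : PySem.Set Int) (k : Int) : Nat → Int → Int → Int
  | 0, _, _ => -1
  | fuel + 1, count, num =>
    if count < k then
      if !(PySem.Set.contains removed num) then
        if count + 1 = k then num
        else if num + 1 > 1000000000 then -1
        else kthLoopA removed k fuel (count + 1) (num + 1)
      else if num + 1 > 1000000000 then -1
      else kthLoopA removed k fuel count (num + 1)
    else -1

def kth_smallest_after_removal (arr : List Int) (k : Int) : Int :=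
  if k ≤ 0 then -1
  else kthLoopA (PySem.Set.ofList arr) k 1000000000 0 1

-- ===== PORT B =====
-- B's loop over the sorted distinct positive removed values, with early break.
def kthWalkB : List Int → Int → Int
  | [], ans => ans
  | v :: vs, ans => if v ≤ ans then kthWalkB vs (ans + 1) else ans

def kth_smallest_after_removal_alt (arr : List Int) (k : Int) : Int :=
  if k ≤ 0 then -1
  else
    let ans := kthWalkB (PySem.List.sorted (PySem.Set.ofList (arr.filter (fun x => 1 ≤ x))) (fun x => x) false) k
    if ans ≤ 1000000000 then ans else -1

-- ===== PRECONDITION & SPEC =====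
def Spec_kth_smallest_after_removal (arr : List Int) (k : Int) (out : Int) : Prop := out = kth_smallest_after_removal_alt arr k
instance (arr : List Int) (k : Int) (out : Int) : Decidable (Spec_kth_smallest_after_removal arr k out) := by unfold Spec_kth_smallest_after_removal; infer_instance

-- ===== CLAIM (what is proved, stated in full; the proofs are below) =====
def Claim_equal_kth_smallest_after_removal : Prop := ∀ (arr : List Int) (k : Int), Dom_kth_smallest_after_removal arr k → Spec_kth_smallest_after_removal arr k (kth_smallest_after_removal arr k)

-- ===== LEMMAS AND PROOFS =====

-- the walk never moves its accumulator down
theorem kthWalkB_ge (l : List Int) (a : Int) : a ≤ kthWalkB l a := by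
  induction l generalizing a with
  | nil => simp [kthWalkB]
  | cons v vs ih =>
    simp only [kthWalkB]
    split
    · exact le_trans (by omega) (ih (a + 1))
    · omega

-- the walk stops immediately when every element is beyond the accumulator
theorem kthWalkB_stop (l : List Int) (a : Int) (h : ∀ v ∈ l, a < v) : kthWalkB l a = a := by
  cases l with
  | nil => rfl
  | cons v vs =>
    have := h v (by simp)
    simp only [kthWalkB]
    split
    · omega
    · rfl

-- filtering a strictly sorted list at a member peels off exactly that member
theorem filter_le_of_mem (L : List Int) (num : Int) (hP : L.Pairwise (· < ·)) (hm : num ∈ L) :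
    L.filter (fun v => num ≤ v) = num :: L.filter (fun v => num + 1 ≤ v) := by
  induction L with
  | nil => simp at hm
  | cons h t ih =>
    rcases List.pairwise_cons.mp hP with ⟨hht, hpt⟩
    rcases List.mem_cons.mp hm with rfl | hmt
    · have ht' : t.filter (fun v => num ≤ v) = t.filter (fun v => num + 1 ≤ v) := by
        apply List.filter_congr
        intro v hv
        have := hht v hv
        simp only [decide_eq_decide]
        omega
      have h1 : decide (num ≤ num) = true := by simp
      have h2 : decide (num + 1 ≤ num) = false := by simp
      simp only [List.filter_cons, h1, h2, Bool.false_eq_true, if_true, if_false]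
      rw [ht']
    · have hlt : h < num := hht num hmt
      have h1 : decide (num ≤ h) = false := by simp; omega
      have h2 : decide (num + 1 ≤ h) = false := by simp; omega
      simp only [List.filter_cons, h1, h2, Bool.false_eq_true, if_false]
      exact ih hpt hmt

-- filtering at a non-member can be tightened by one
theorem filter_le_of_not_mem (L : List Int) (num : Int) (hm : num ∉ L) :
    L.filter (fun v => num ≤ v) = L.filter (fun v => num + 1 ≤ v) := by
  apply List.filter_congr
  intro v hv
  have : v ≠ num := fun h => hm (h ▸ hv)
  simp only [decide_eq_decide]
  omega

-- main invariant: A's scan from `num` with `count` hits equals B's walk over the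
-- not-yet-passed removed values, capped at 10^9
theorem loop_eq_walk (L : List Int) (removed : PySem.Set Int)
    (hP : L.Pairwise (· < ·))
    (hmem : ∀ v : Int, 1 ≤ v → ((PySem.Set.contains removed v = true) ↔ v ∈ L)) :
    ∀ (fuel : Nat) (k count num : Int), 1 ≤ num → num ≤ 1000000000 → count < k →
      (1000000000 + 1 - num) ≤ (fuel : Int) →
      kthLoopA removed k fuel count num =
        (if kthWalkB (L.filter (fun v => num ≤ v)) (num + (k - count) - 1) ≤ 1000000000
         then kthWalkB (L.filter (fun v => num ≤ v)) (num + (k - count) - 1) else -1) := by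
  intro fuel
  induction fuel with
  | zero => intro k count num h1 hB hck hf; simp at hf; omega
  | succ fuel ih =>
    intro k count num h1 hB hck hf
    simp only [kthLoopA, if_pos hck]
    by_cases hc : PySem.Set.contains removed num = true
    · -- num is removed: skip it
      have hmL : num ∈ L := (hmem num h1).mp hc
      have hfilter := filter_le_of_mem L num hP hmL
      rw [hfilter]
      have hstep : kthWalkB (num :: L.filter (fun v => num + 1 ≤ v)) (num + (k - count) - 1)
          = kthWalkB (L.filter (fun v => num + 1 ≤ v)) ((num + 1) + (k - count) - 1) := by
        simp only [kthWalkB]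
        rw [if_pos (by omega)]
        congr 1
        omega
      rw [hstep, hc]
      simp only [Bool.not_true, Bool.false_eq_true, if_false]
      by_cases hcap : num + 1 > 1000000000
      · rw [if_pos hcap]
        have hge := kthWalkB_ge (L.filter (fun v => num + 1 ≤ v)) ((num + 1) + (k - count) - 1)
        rw [if_neg (by omega)]
      · rw [if_neg hcap]
        exact ih k count (num + 1) (by omega) (by omega) hck (by push_cast at hf ⊢; omega)
    · -- num survives: it is counted
      have hnm : num ∉ L := fun h => hc ((hmem num h1).mpr h)
      have hfilter := filter_le_of_not_mem L num hnm
      have hgt : ∀ v ∈ L.filter (fun v => num + 1 ≤ v), num < v := by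
        intro v hv
        have := (List.mem_filter.mp hv).2
        simp at this
        omega
      rw [eq_false_of_ne_true hc]
      simp only [Bool.not_false, if_true]
      by_cases hk1 : count + 1 = k
      · rw [if_pos hk1]
        have : num + (k - count) - 1 = num := by omega
        rw [hfilter, this, kthWalkB_stop _ _ hgt, if_pos hB]
      · rw [if_neg hk1]
        have harith : num + (k - count) - 1 = (num + 1) + (k - (count + 1)) - 1 := by omega
        rw [hfilter, harith]
        by_cases hcap : num + 1 > 1000000000
        · rw [if_pos hcap]
          have hge := kthWalkB_ge (L.filter (fun v => num + 1 ≤ v)) ((num + 1) + (k - (count + 1)) - 1)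
          rw [if_neg (by omega)]
        · rw [if_neg hcap]
          exact ih k (count + 1) (num + 1) (by omega) (by omega) (by omega) (by push_cast at hf ⊢; omega)

-- ===== VERDICT (by name: the statement is the Claim_ definition above) =====
theorem kth_smallest_after_removal_spec : Claim_equal_kth_smallest_after_removal := by
  intro arr k _
  unfold Spec_kth_smallest_after_removal kth_smallest_after_removal kth_smallest_after_removal_alt
  by_cases hk : k ≤ 0
  · simp [hk]
  · rw [if_neg hk, if_neg hk]
    set L := PySem.List.sorted (PySem.Set.ofList (arr.filter (fun x => 1 ≤ x))) (fun x => x) false with hL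
    have hP : L.Pairwise (· < ·) := PySem.List.sorted_ofList_pairwise_lt _
    have hmemL : ∀ v : Int, v ∈ L ↔ (v ∈ arr ∧ 1 ≤ v) := by
      intro v
      rw [hL]
      simp [PySem.List.mem_sorted, PySem.Set.mem_ofList, List.mem_filter]
    have hmem : ∀ v : Int, 1 ≤ v → ((PySem.Set.contains (PySem.Set.ofList arr) v = true) ↔ v ∈ L) := by
      intro v hv
      rw [hmemL]
      simp [pysem, PySem.Set.contains]
      omega
    have := loop_eq_walk L (PySem.Set.ofList arr) hP hmem 1000000000 k 0 1
      (by omega) (by omega) (by omega) (by norm_num)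
    rw [this]
    have hall : L.filter (fun v => (1 : Int) ≤ v) = L := by
      apply List.filter_eq_self.mpr
      intro v hv
      have := (hmemL v).mp hv
      simp
      omega
    rw [hall]
    have : (1 : Int) + (k - 0) - 1 = k := by ring
    rw [this]
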